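-- pv_equiv track=rewrite | github.com/Aadeshveer/Small-python-projects | 3.Bitmap_Message/bitmap.py | pascal_traiangle
-- ===== SOURCE A (Python) =====
-- def odd_ncr(n,r):
--     return pow_x(n,2) == pow_x(r,2)+pow_x(n-r,2)
--
-- def pow_x(n,x):
--     p = 0
--     factor = x
--     while(n//factor):
--         p+=n//factor
--         factor*=x
--     return p
--
-- def pascal_traiangle(n,char):
--     lst = []
--     for i in range(n):
--         for j in range(n-1-i): lst.append(" ")
--         for j in range(i+1):
--             lst.append(char+" " if odd_ncr(i,j) else "  ")
--         lst.append("\n")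
--     return lst
-- ===== SOURCE B (Python) =====
-- def pascal_traiangle(n, char):
--     # Kummer/Lucas: C(i, j) is odd iff (i & j) == j; one flat comprehension, O(1) per cell.
--     mark = char + " "
--     return [cell
--             for i in range(n)
--             for cell in [" "] * (n - 1 - i)
--                         + [mark if (i & j) == j else "  " for j in range(i + 1)]
--                         + ["\n"]]
-- ===== Notes on version B (the rewrite author's own statement) =====
-- stated objective: faster
-- what changed: Replaces A's per-cell parity test via three Legendre power-sum while-loops (pow_x) by the Kummer/Lucas bitwise test (i & j) == j, and builds the whole cell list as one flat comprehension instead of nested append loops.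
import Mathlib
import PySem

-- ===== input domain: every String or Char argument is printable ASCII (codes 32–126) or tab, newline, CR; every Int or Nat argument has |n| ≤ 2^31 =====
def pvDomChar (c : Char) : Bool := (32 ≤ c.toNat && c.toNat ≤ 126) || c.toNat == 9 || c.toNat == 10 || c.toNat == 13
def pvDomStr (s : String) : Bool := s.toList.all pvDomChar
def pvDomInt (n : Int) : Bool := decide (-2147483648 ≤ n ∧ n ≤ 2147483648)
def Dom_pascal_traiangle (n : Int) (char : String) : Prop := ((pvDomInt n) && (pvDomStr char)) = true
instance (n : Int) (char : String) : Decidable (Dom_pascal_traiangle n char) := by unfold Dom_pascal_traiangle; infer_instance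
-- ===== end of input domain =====

-- B replaces A's per-cell Legendre power-sum loops by the Kummer/Lucas bitwise test (i & j) == j (faster).

-- ===== PORT A =====
-- Python's 'while n//factor:' loop; the fuel n.natAbs + 1 is never exhausted on the calls
-- pascal_traiangle makes (x = 2, 0 ≤ n), since the loop there runs at most log2 n < n.natAbs + 1 times.
def pow_x_loop (n x : Int) : Nat → Int → Int → Int
  | 0, p, _ => p
  | fuel+1, p, factor =>
    if PySem.Int.floordiv n factor ≠ 0 then
      pow_x_loop n x fuel (p + PySem.Int.floordiv n factor) (factor * x)
    else p

def pow_x (n x : Int) : Int := pow_x_loop n x (n.natAbs + 1) 0 x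

def odd_ncr (n r : Int) : Bool := pow_x n 2 == pow_x r 2 + pow_x (n - r) 2

def pascal_traiangle (n : Int) (char : String) : List String :=
  (PySem.List.pyRange 0 n 1).foldl (fun lst i =>
    let lst := (PySem.List.pyRange 0 (n - 1 - i) 1).foldl (fun l _ => l ++ [" "]) lst
    let lst := (PySem.List.pyRange 0 (i + 1) 1).foldl
        (fun l j => l ++ [if odd_ncr i j then char ++ " " else "  "]) lst
    lst ++ ["\n"]) []

-- ===== PORT B =====
def pascal_traiangle_alt (n : Int) (char : String) : List String :=
  let mark := char ++ " "
  (PySem.List.pyRange 0 n 1).flatMap (fun i =>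
    List.replicate (n - 1 - i).toNat " "
    -- Python's '(i & j) == j'; exact via toNat since the loop indices i, j are nonnegative
    ++ (PySem.List.pyRange 0 (i + 1) 1).map
        (fun j => if (i.toNat &&& j.toNat) == j.toNat then mark else "  ")
    ++ ["\n"])

-- ===== PRECONDITION & SPEC =====
def Spec_pascal_traiangle (n : Int) (char : String) (out : List String) : Prop := out = pascal_traiangle_alt n char
instance (n : Int) (char : String) (out : List String) : Decidable (Spec_pascal_traiangle n char out) := by unfold Spec_pascal_traiangle; infer_instance

-- ===== CLAIM (what is proved, stated in full; the proofs are below) =====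
def Claim_equal_pascal_traiangle : Prop := ∀ (n : Int) (char : String), Dom_pascal_traiangle n char → Spec_pascal_traiangle n char (pascal_traiangle n char)

-- ===== LEMMAS AND PROOFS =====

-- The while-loop of pow_x computes a Legendre partial sum (given enough fuel).
lemma pow_x_loop_eq (m : ℕ) : ∀ (fuel t : ℕ) (p : Int), m < 2^(t + fuel + 1) →
    pow_x_loop (m : Int) 2 fuel p ((2:Int)^(t+1)) =
      p + ∑ i ∈ Finset.range fuel, ((m / 2^(t+1+i) : ℕ) : Int) := by
  intro fuel
  induction fuel with
  | zero => intro t p _; simp [pow_x_loop]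
  | succ fuel ih =>
    intro t p h
    have hcast : ((2:Int)^(t+1)) = ((2^(t+1) : ℕ) : Int) := by push_cast; ring
    have hfd : PySem.Int.floordiv (m : Int) ((2:Int)^(t+1)) = ((m / 2^(t+1) : ℕ) : Int) := by
      rw [hcast]; exact_mod_cast PySem.Int.floordiv_natCast m (2^(t+1))
    by_cases hz : m / 2^(t+1) = 0
    · have hlt : m < 2^(t+1) := Nat.lt_of_div_eq_zero (Nat.pow_pos (by norm_num)) hz
      have hstop : pow_x_loop (m : Int) 2 (fuel+1) p ((2:Int)^(t+1)) = p := by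
        simp only [pow_x_loop, hfd, hz, Nat.cast_zero, ne_eq, not_true_eq_false, if_false]
      rw [hstop]
      have hall : ∀ i ∈ Finset.range (fuel+1), ((m / 2^(t+1+i) : ℕ) : Int) = 0 := by
        intro i _
        have : m < 2^(t+1+i) := lt_of_lt_of_le hlt (Nat.pow_le_pow_right (by norm_num) (by omega))
        simp [Nat.div_eq_of_lt this]
      rw [Finset.sum_congr rfl hall]; simp
    · have hstep : pow_x_loop (m : Int) 2 (fuel+1) p ((2:Int)^(t+1)) =
          pow_x_loop (m : Int) 2 fuel (p + ((m / 2^(t+1) : ℕ) : Int)) ((2:Int)^(t+2)) := by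
        have h2pow : ((2:Int)^(t+1)) * 2 = (2:Int)^(t+2) := by ring
        have hne : ((m / 2^(t+1) : ℕ) : Int) ≠ 0 := by exact_mod_cast hz
        simp only [pow_x_loop, hfd, hne, ne_eq, not_false_eq_true, if_true, h2pow]
      have hexp : (t+1) + fuel + 1 = t + (fuel + 1) + 1 := by omega
      rw [hstep, ih (t+1) _ (by rw [hexp]; exact h)]
      rw [Finset.sum_range_succ']
      have : ∀ i, t+1+(i+1) = t+2+i := by omega
      simp only [this]
      push_cast; ring

lemma pow_x_eq (m : ℕ) : pow_x (m : Int) 2 = ((Nat.factorial m).factorization 2 : Int) := by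
  have hfuel : m < 2 ^ (0 + ((m:Int).natAbs + 1) + 1) := by
    simp only [Int.natAbs_natCast]
    calc m < 2^m := Nat.lt_two_pow_self
    _ ≤ 2^(0 + (m+1) + 1) := Nat.pow_le_pow_right (by norm_num) (by omega)
  have hloop := pow_x_loop_eq m ((m:Int).natAbs + 1) 0 0 hfuel
  have h21 : ((2:Int)^(0+1)) = 2 := by norm_num
  rw [h21] at hloop
  rw [pow_x, hloop]
  simp only [Int.natAbs_natCast, zero_add]
  have hleg := Nat.factorization_factorial (p := 2) Nat.prime_two
      (n := m) (b := m + 2) (lt_of_le_of_lt (Nat.log_le_self 2 m) (by omega))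
  rw [hleg, Finset.sum_Ico_eq_sum_range]
  push_cast
  apply Finset.sum_congr (by norm_num)
  intro i _
  norm_num [Nat.add_comm]

-- bit-level recursion for the subset-of-bits test
lemma land_decomp (i j : ℕ) : i &&& j = j ↔ ((i/2) &&& (j/2) = j/2 ∧ j % 2 ≤ i % 2) := by
  have e1 : i &&& j = 2 * ((i/2) &&& (j/2)) + (i &&& j) % 2 := by
    rw [← Nat.and_div_two]; omega
  have himp1 : (i &&& j) % 2 = 1 → (i % 2 = 1 ∧ j % 2 = 1) := Nat.and_mod_two_eq_one.mp
  have himp2 : i % 2 = 1 → j % 2 = 1 → (i &&& j) % 2 = 1 :=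
    fun a b => Nat.and_mod_two_eq_one.mpr ⟨a, b⟩
  omega

-- Kummer/Lucas for p = 2: C(i, j) is odd iff the bits of j are a subset of the bits of i.
lemma odd_choose_iff : ∀ i, ∀ j ≤ i, (¬ 2 ∣ Nat.choose i j ↔ i &&& j = j) := by
  intro i
  induction i using Nat.strong_induction_on with
  | _ i ih =>
    intro j hj
    rcases Nat.eq_zero_or_pos i with rfl | hpos
    · interval_cases j; simp
    · haveI : Fact (Nat.Prime 2) := ⟨Nat.prime_two⟩
      have hmod := Choose.choose_modEq_choose_mod_mul_choose_div_nat (p := 2) (n := i) (k := j)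
      have hdvd : 2 ∣ Nat.choose i j ↔
          2 ∣ Nat.choose (i % 2) (j % 2) * Nat.choose (i / 2) (j / 2) := by
        rw [← Nat.modEq_zero_iff_dvd, ← Nat.modEq_zero_iff_dvd]
        exact ⟨fun h => hmod.symm.trans h, fun h => hmod.trans h⟩
      have ihd := ih (i / 2) (Nat.div_lt_self hpos (by norm_num)) (j / 2)
          (Nat.div_le_div_right hj)
      rw [land_decomp]
      by_cases hle : j % 2 ≤ i % 2
      · have hone : Nat.choose (i % 2) (j % 2) = 1 := by
          rcases Nat.mod_two_eq_zero_or_one i with hi | hi <;>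
            rcases Nat.mod_two_eq_zero_or_one j with hjm | hjm <;>
              simp only [hi, hjm] <;> first | rfl | omega
        rw [hdvd, hone, one_mul]
        constructor
        · intro h; exact ⟨ihd.mp h, hle⟩
        · intro ⟨h, _⟩; exact ihd.mpr h
      · have hi0 : i % 2 = 0 := by omega
        have hj1 : j % 2 = 1 := by omega
        have hzero : Nat.choose (i % 2) (j % 2) = 0 := by rw [hi0, hj1]; simp
        rw [hdvd, hzero, zero_mul]
        simp [hle]

-- per-cell agreement of the two tests
lemma odd_ncr_eq (i j : ℕ) (h : j ≤ i) :
    odd_ncr (i : Int) (j : Int) = ((i &&& j) == j) := by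
  have hsub : (i : Int) - (j : Int) = ((i - j : ℕ) : Int) := by omega
  rw [odd_ncr, hsub, pow_x_eq, pow_x_eq, pow_x_eq]
  have hfact : (Nat.factorial i).factorization 2 =
      (Nat.factorial j).factorization 2 + (Nat.factorial (i - j)).factorization 2 ↔
      i &&& j = j := by
    have hc := Nat.choose_mul_factorial_mul_factorial h
    have hne : Nat.choose i j ≠ 0 := (Nat.choose_pos h).ne'
    have hsplit : (Nat.factorial i).factorization 2 =
        (Nat.choose i j).factorization 2 + (Nat.factorial j).factorization 2 +
          (Nat.factorial (i - j)).factorization 2 := by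
      rw [← hc, Nat.factorization_mul (by positivity) (Nat.factorial_ne_zero _),
        Nat.factorization_mul hne (Nat.factorial_ne_zero _)]
      simp
    rw [hsplit]
    have hchoose : (Nat.choose i j).factorization 2 = 0 ↔ ¬ 2 ∣ Nat.choose i j := by
      rw [Nat.factorization_eq_zero_iff]
      constructor
      · rintro (h' | h' | h')
        · exact absurd Nat.prime_two h'
        · exact h'
        · exact absurd h' hne
      · intro h'; exact Or.inr (Or.inl h')
    constructor
    · intro heq
      exact (odd_choose_iff i j h).mp (hchoose.mp (by omega))
    · intro hland
      have := hchoose.mpr ((odd_choose_iff i j h).mpr hland)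
      omega
  rw [Bool.eq_iff_iff]
  simp only [beq_iff_eq]
  rw [← hfact]
  constructor
  · intro h'; exact_mod_cast h'
  · intro h'; exact_mod_cast h'

-- one row of A equals one row of B
lemma space_run (m : Int) (lst : List String) :
    (PySem.List.pyRange 0 m 1).foldl (fun l (_ : Int) => l ++ [" "]) lst
      = lst ++ List.replicate m.toNat " " := by
  rw [PySem.List.foldl_append_singleton_eq_map (f := fun (_ : Int) => " ")]
  rw [List.map_const']
  rw [PySem.List.length_pyRange_one]
  norm_num

lemma row_eq (n : Int) (char : String) (i : Int) (lst : List String) (hi : (0:Int) ≤ i) :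
    ((PySem.List.pyRange 0 (i + 1) 1).foldl
        (fun l j => l ++ [if odd_ncr i j then char ++ " " else "  "])
        ((PySem.List.pyRange 0 (n - 1 - i) 1).foldl (fun l (_ : Int) => l ++ [" "]) lst))
      ++ ["\n"]
    = lst ++ (List.replicate (n - 1 - i).toNat " "
        ++ (PySem.List.pyRange 0 (i + 1) 1).map
            (fun j => if (i.toNat &&& j.toNat) == j.toNat then char ++ " " else "  ")
        ++ ["\n"]) := by
  rw [space_run]
  rw [PySem.List.foldl_append_singleton_eq_map
      (f := fun j => if odd_ncr i j then char ++ " " else "  ")]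
  rw [List.map_congr_left (f := fun j => if odd_ncr i j then char ++ " " else "  ")
      (g := fun j => if (i.toNat &&& j.toNat) == j.toNat then char ++ " " else "  ")
      (by
        intro j hj
        rcases (PySem.List.mem_pyRange_one).mp hj with ⟨hj0, hj1⟩
        have hiN : i = ((i.toNat : ℕ) : Int) := (Int.toNat_of_nonneg hi).symm
        have hjN : j = ((j.toNat : ℕ) : Int) := (Int.toNat_of_nonneg hj0).symm
        have hle : j.toNat ≤ i.toNat := by omega
        have hcell := odd_ncr_eq i.toNat j.toNat hle
        rw [← hiN, ← hjN] at hcell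
        simp only [hcell])]
  simp [List.append_assoc]

-- ===== VERDICT (by name: the statement is the Claim_ definition above) =====
theorem pascal_traiangle_spec : Claim_equal_pascal_traiangle := by
  intro n char _
  unfold Spec_pascal_traiangle
  simp only [pascal_traiangle, pascal_traiangle_alt]
  rw [PySem.List.foldl_congr_mem
      (l := PySem.List.pyRange 0 n 1) (init := ([] : List String))
      (f := fun (lst : List String) (i : Int) =>
        List.foldl (fun l j => l ++ [if odd_ncr i j then char ++ " " else "  "])
          (List.foldl (fun l (_ : Int) => l ++ [" "]) lst (PySem.List.pyRange 0 (n - 1 - i) 1))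
          (PySem.List.pyRange 0 (i + 1) 1) ++ ["\n"])
      (g := fun (acc : List String) (i : Int) =>
        acc ++ (List.replicate (n - 1 - i).toNat " "
          ++ (PySem.List.pyRange 0 (i + 1) 1).map
              (fun j => if (i.toNat &&& j.toNat) == j.toNat then char ++ " " else "  ")
          ++ ["\n"]))
      (by
        intro acc i hiMem
        rcases (PySem.List.mem_pyRange_one).mp hiMem with ⟨hi0, _⟩
        exact row_eq n char i acc hi0)]
  rw [PySem.List.foldl_append_eq_flatMap]
  simp
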